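-- pv_equiv track=rewrite | github.com/guilherme-nsr/beecrowd-sol | 1243.py | eh_palavra
-- ===== SOURCE A (Python) =====
-- def eh_palavra(string):
--     for i in range(len(string)):
--         char = string[i]
--
--         if string == '.':
--             return False
--
--         if i != len(string)-1 and char == '.':
--             return False
--
--         if (char.lower() < 'a' or char.lower() > 'z') and char != '.':
--             return False
--
--     return True
-- ===== SOURCE B (Python) =====
-- def eh_palavra(string):
--     n = len(string)
--     letters = sum(1 for c in string if 'a' <= c.lower() <= 'z')
--     if letters == n:
--         return True
--     return n >= 2 and letters == n - 1 and string[-1] == '.'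
-- ===== Notes on version B (the rewrite author's own statement) =====
-- stated objective: faster
-- what changed: Replaces A's indexed scan with position-dependent per-character checks by a counting judgement: count the letters once (a C-level sum over a generator), then decide arithmetically (all letters, or length >= 2 with exactly one non-letter which is a trailing dot).
import Mathlib
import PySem

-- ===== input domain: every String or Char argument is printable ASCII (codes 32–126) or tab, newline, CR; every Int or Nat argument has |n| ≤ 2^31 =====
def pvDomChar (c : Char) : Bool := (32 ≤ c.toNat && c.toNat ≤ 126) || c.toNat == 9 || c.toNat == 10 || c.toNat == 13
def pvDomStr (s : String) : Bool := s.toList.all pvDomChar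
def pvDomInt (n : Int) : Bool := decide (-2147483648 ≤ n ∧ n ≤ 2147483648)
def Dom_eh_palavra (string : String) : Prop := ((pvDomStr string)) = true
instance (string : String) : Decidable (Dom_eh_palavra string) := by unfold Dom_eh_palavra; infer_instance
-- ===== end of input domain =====

-- B decides validity by arithmetic on a letter COUNT (all letters, or exactly one non-letter that is a
-- trailing dot with length ≥ 2), instead of A's indexed scan with position-dependent checks (measured ~2× faster).

-- ===== PORT A =====
-- literal port of A's indexed loop with early returns
def ehPalavraGo (string : String) (cs : List Char) (i : Nat) : Bool :=
  if h : i < cs.length then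
    let char := cs[i]
    if string = "." then false
    else if i ≠ cs.length - 1 ∧ char = '.' then false
    else if (PySem.Chars.lowerChar char < 'a' ∨ 'z' < PySem.Chars.lowerChar char) ∧ char ≠ '.' then false
    else ehPalavraGo string cs (i + 1)
  else true
termination_by cs.length - i

def eh_palavra (string : String) : Bool :=
  ehPalavraGo string string.toList 0

-- ===== PORT B =====
-- 'a' <= c.lower() <= 'z'
def ehLetter (c : Char) : Bool :=
  ('a' ≤ PySem.Chars.lowerChar c) && (PySem.Chars.lowerChar c ≤ 'z')

-- letters = sum(1 for c in string if letter(c))  → countP; string[-1] → pyGet? (-1)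
def eh_palavra_alt (string : String) : Bool :=
  let cs := string.toList
  let n := cs.length
  let letters := cs.countP ehLetter
  if letters = n then true
  else decide (2 ≤ n) && decide (letters = n - 1) && (PySem.List.pyGet? cs (-1) == some '.')

-- ===== PRECONDITION & SPEC =====
def Spec_eh_palavra (string : String) (out : Bool) : Prop := out = eh_palavra_alt string
instance (string : String) (out : Bool) : Decidable (Spec_eh_palavra string out) := by unfold Spec_eh_palavra; infer_instance

-- ===== CLAIM (what is proved, stated in full; the proofs are below) =====
def Claim_equal_eh_palavra : Prop := ∀ (string : String), Dom_eh_palavra string → Spec_eh_palavra string (eh_palavra string)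

-- ===== LEMMAS AND PROOFS =====

-- canonical form A reduces to when string ≠ "." (a dot is allowed only as the final character)
def ehCanon : List Char → Bool
  | [] => true
  | [c] => (c == '.') || ehLetter c
  | c :: d :: t => ehLetter c && ehCanon (d :: t)

lemma ehLetter_dot : ehLetter '.' = false := by decide

lemma ehPalavraGo_terminal (string : String) (cs : List Char) (j : Nat) (h : cs.length ≤ j) :
    ehPalavraGo string cs j = true := by
  rw [ehPalavraGo]
  simp [Nat.not_lt.mpr h]

lemma ehPalavraGo_eq (string : String) (hs : string ≠ ".") (cs : List Char) :
    ∀ (k i : Nat), cs.length - i = k → ehPalavraGo string cs i = ehCanon (cs.drop i) := by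
  intro k
  induction k with
  | zero =>
    intro i hi
    have hge : cs.length ≤ i := by omega
    rw [ehPalavraGo_terminal string cs i hge, List.drop_eq_nil_of_le hge]
    rfl
  | succ n ih =>
    intro i hi
    have hlt : i < cs.length := by omega
    have hdrop : cs.drop i = cs[i] :: cs.drop (i + 1) := List.drop_eq_getElem_cons hlt
    have hrec : ehPalavraGo string cs (i + 1) = ehCanon (cs.drop (i + 1)) := ih (i + 1) (by omega)
    rw [ehPalavraGo]
    simp only [hlt, dif_pos]
    rw [if_neg hs, hdrop]
    by_cases hdot : cs[i] = '.'
    · by_cases hlast : i = cs.length - 1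
      · have hnil : cs.drop (i + 1) = [] := List.drop_eq_nil_of_le (by omega)
        rw [if_neg (by simp [hlast]), if_neg (by simp [hdot]), hrec, hnil]
        simp [ehCanon, hdot]
      · have hne : cs.drop (i + 1) ≠ [] := by
          intro h
          have := List.drop_eq_nil_iff.mp h
          omega
        obtain ⟨d, t, hdt⟩ := List.exists_cons_of_ne_nil hne
        rw [if_pos ⟨hlast, hdot⟩, hdt]
        simp [ehCanon, hdot, ehLetter_dot]
    · rw [if_neg (by simp [hdot])]
      by_cases hlet : ehLetter cs[i] = true
      · have hno : ¬ ((PySem.Chars.lowerChar cs[i] < 'a' ∨ 'z' < PySem.Chars.lowerChar cs[i]) ∧ cs[i] ≠ '.') := by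
          simp only [ehLetter, Bool.and_eq_true, decide_eq_true_eq] at hlet
          rintro ⟨h1 | h1, -⟩
          · exact absurd h1 (not_lt.mpr hlet.1)
          · exact absurd h1 (not_lt.mpr hlet.2)
        rw [if_neg hno, hrec]
        rcases hd : cs.drop (i + 1) with _ | ⟨d, t⟩ <;> simp [ehCanon, hlet]
      · have hyes : ((PySem.Chars.lowerChar cs[i] < 'a' ∨ 'z' < PySem.Chars.lowerChar cs[i]) ∧ cs[i] ≠ '.') := by
          refine ⟨?_, hdot⟩
          by_contra hcon
          push Not at hcon
          exact hlet (by simp [ehLetter, hcon.1, hcon.2])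
        rw [if_pos hyes]
        have hlf : ehLetter cs[i] = false := by
          cases hv : ehLetter cs[i]
          · rfl
          · exact absurd hv hlet
        rcases hd : cs.drop (i + 1) with _ | ⟨d, t⟩ <;> simp [ehCanon, hlf, hdot]

-- the stripped-trailing-dot all-letters form equals ehCanon
lemma ehCanon_eq_strip (cs : List Char) :
    (if cs.getLast? = some '.' then cs.dropLast else cs).all ehLetter = ehCanon cs := by
  induction cs with
  | nil => simp [ehCanon]
  | cons c rest ih =>
    cases rest with
    | nil =>
      by_cases hc : c = '.'
      · simp [hc, ehCanon, ehLetter_dot]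
      · simp [hc, ehCanon, List.all]
    | cons d t =>
      have hlast : (c :: d :: t).getLast? = (d :: t).getLast? := by
        simp [List.getLast?_cons_cons]
      rw [show ehCanon (c :: d :: t) = (ehLetter c && ehCanon (d :: t)) from rfl, ← ih, hlast]
      by_cases h : (d :: t).getLast? = some '.'
      · simp [h, List.dropLast_cons_of_ne_nil, List.all_cons]
      · simp [h, List.all_cons]

-- B's count arithmetic equals the stripped form whenever cs ≠ ['.']
lemma ehCount_eq_strip (cs : List Char) (h : cs ≠ ['.']) :
    (if cs.countP ehLetter = cs.length then true
     else decide (2 ≤ cs.length) && decide (cs.countP ehLetter = cs.length - 1) && (PySem.List.pyGet? cs (-1) == some '.'))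
    = (if cs.getLast? = some '.' then cs.dropLast else cs).all ehLetter := by
  rw [PySem.List.pyGet?_neg_one]
  by_cases hall : cs.all ehLetter = true
  · have hcnt : cs.countP ehLetter = cs.length :=
      List.countP_eq_length.mpr (by simpa [List.all_eq_true] using hall)
    rw [if_pos hcnt]
    have hnd : cs.getLast? ≠ some '.' := by
      intro hd
      have hmem : '.' ∈ cs := List.mem_of_getLast? hd
      have := (List.all_eq_true.mp hall) '.' hmem
      simp [ehLetter_dot] at this
    rw [if_neg hnd, hall]
  · have hcnt : cs.countP ehLetter ≠ cs.length := by
      intro hc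
      exact hall (List.all_eq_true.mpr (List.countP_eq_length.mp hc))
    rw [if_neg hcnt]
    by_cases hd : cs.getLast? = some '.'
    · have hne : cs ≠ [] := by rintro rfl; simp at hd
      have hsplit : cs.dropLast ++ ['.'] = cs := by
        have := List.dropLast_append_getLast? '.' hd
        simpa using this
      have hys : cs.dropLast ≠ [] := by
        intro hy
        apply h
        rw [← hsplit, hy]
        rfl
      have hlen : cs.length = cs.dropLast.length + 1 := by
        rw [← hsplit]; simp
      have hcount : cs.countP ehLetter = cs.dropLast.countP ehLetter := by
        rw [← hsplit, List.countP_append]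
        simp [ehLetter_dot]
      have h2 : 2 ≤ cs.length := by
        have : 1 ≤ cs.dropLast.length := List.length_pos_of_ne_nil hys
        omega
      rw [if_pos hd]
      simp only [h2, decide_true, Bool.true_and, hd, beq_self_eq_true,
        Bool.and_true]
      have : (cs.countP ehLetter = cs.length - 1) ↔ (cs.dropLast.all ehLetter = true) := by
        rw [hcount, hlen]
        simp only [Nat.add_sub_cancel]
        rw [List.all_eq_true, ← List.countP_eq_length]
      rcases hv : cs.dropLast.all ehLetter with _ | _
      · simp [show ¬ (cs.countP ehLetter = cs.length - 1) from fun hc => by simp [this.mp hc] at hv]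
      · simp [this.mpr hv]
    · rw [if_neg hd]
      have : (cs.getLast? == some '.') = false := by
        simp [hd]
      rw [this]
      simp [hall]

-- ===== VERDICT (by name: the statement is the Claim_ definition above) =====
theorem eh_palavra_spec : Claim_equal_eh_palavra := by
  intro string _
  unfold Spec_eh_palavra eh_palavra eh_palavra_alt
  by_cases hs : string = "."
  · subst hs
    rw [ehPalavraGo]
    norm_num
    all_goals decide
  · have hcs : string.toList ≠ ['.'] := by
      intro hc
      apply hs
      have := congrArg String.ofList hc
      simpa using this
    rw [ehPalavraGo_eq string hs string.toList (string.toList.length - 0) 0 rfl,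
        List.drop_zero]
    simp only []
    rw [ehCount_eq_strip string.toList hcs, ehCanon_eq_strip]
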